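-- pv_equiv track=rewrite | github.com/AvielleGregorio/CSCI71 | Corpuz_Gregorio.py | evaluate
-- ===== SOURCE A (Python) =====
-- def evaluate(s):
--     content = s[1:-1]
--
--     def process(tokens):
--         res = ""
--         while tokens:
--             char = tokens.pop(0)
--             if char == 'x':     # Adds x to result
--                 res += 'x'
--             elif char == '<':   # <S> -> SS
--                 inner = process(tokens)
--                 res += (inner + inner)
--             elif char == '{':   # {S} ->Sx
--                 inner = process(tokens)
--                 res += (inner + 'x')
--             elif char == '[':   # [S] -> empty
--                 process(tokens)
--                 res += ""
--             elif char == '(':   # (xS) -> pop x, return S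
--                 inner = process(tokens)
--                 if inner.startswith('x'):
--                     res += inner[1:]
--                 else:
--                     res += inner
--             elif char in '>}])':
--                 return res
--         return res
--
--     final_string = process(list(content))
--     return len(final_string)
-- ===== SOURCE B (Python) =====
-- def _apply(op, n):
--     # result-length contribution of a subexpression of length n closed under opener op
--     if op == '<':
--         return 2 * n           # <S> -> SS
--     if op == '{':
--         return n + 1           # {S} -> Sx
--     if op == '[':
--         return 0               # [S] -> empty
--     return max(n - 1, 0)       # (S) -> drop one leading x (all chars are x)
--
--
-- def evaluate(s):
--     ops = []        # openers of the currently open levels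
--     counts = [0]    # counts[-1] = length accumulated at the innermost open level
--     for c in s[1:-1]:
--         if c == 'x':
--             counts[-1] += 1
--         elif c in '<{[(':
--             ops.append(c)
--             counts.append(0)
--         elif c in '>}])':
--             if not ops:
--                 break          # stray closer at top level: rest is ignored
--             v = _apply(ops.pop(), counts.pop())
--             counts[-1] += v
--     while ops:                 # unmatched openers close at end of input
--         v = _apply(ops.pop(), counts.pop())
--         counts[-1] += v
--     return counts[0]
-- ===== Notes on version B (the rewrite author's own statement) =====
-- stated objective: faster
-- what changed: B discards the string entirely: a single iterative pass over the content keeps an explicit stack of per-level integer counts (push on an opener, combine into the parent on a closer, unwind unmatched openers at the end), instead of A's recursive process that builds the expanded all-'x' string with pop(0) on a shared token list.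
import Mathlib
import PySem

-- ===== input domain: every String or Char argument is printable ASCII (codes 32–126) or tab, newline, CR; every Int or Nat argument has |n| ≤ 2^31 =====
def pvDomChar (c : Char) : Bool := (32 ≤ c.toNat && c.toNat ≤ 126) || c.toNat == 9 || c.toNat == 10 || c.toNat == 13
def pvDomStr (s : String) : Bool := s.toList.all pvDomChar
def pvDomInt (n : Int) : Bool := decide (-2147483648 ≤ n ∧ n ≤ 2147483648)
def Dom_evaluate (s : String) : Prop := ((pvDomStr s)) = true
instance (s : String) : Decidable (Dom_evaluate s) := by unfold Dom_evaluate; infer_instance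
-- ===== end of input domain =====

-- B replaces A's recursive construction of the (worst-case exponentially long) all-'x' string by a
-- single iterative pass with an explicit stack of per-level integer counts; equal return value proved.

-- ===== PORT A =====
-- A's inner `process` mutates a shared token list; ported as a function returning (result, remaining
-- tokens). The while-loop/recursion is driven by a fuel parameter (2*len+2 is proved ample; fuel
-- irrelevance is established in the lemmas below). Strings are List Char here.
def processA : Nat → List Char → List Char × List Char
  | 0, t => ([], t)
  | _ + 1, [] => ([], [])
  | f + 1, c :: rest =>
    if c = 'x' then
      let p := processA f rest
      ('x' :: p.1, p.2)
    else if c = '<' then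
      let i := processA f rest
      let p := processA f i.2
      (i.1 ++ i.1 ++ p.1, p.2)
    else if c = '{' then
      let i := processA f rest
      let p := processA f i.2
      (i.1 ++ ['x'] ++ p.1, p.2)
    else if c = '[' then
      let i := processA f rest
      let p := processA f i.2
      (p.1, p.2)
    else if c = '(' then
      let i := processA f rest
      let p := processA f i.2
      ((if i.1.head? = some 'x' then i.1.tail else i.1) ++ p.1, p.2)
    else if c = '>' ∨ c = '}' ∨ c = ']' ∨ c = ')' then ([], rest)
    else
      let p := processA f rest
      (p.1, p.2)

def evaluate (s : String) : Int :=
  let content := PySem.List.slice s.toList (some 1) (some (-1))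
  ((processA (2 * content.length + 2) content).1.length : Int)

-- ===== PORT B =====
-- Source B: `_apply` gives the contribution of a closed level; `evaluate` walks the content once keeping
-- an explicit stack (`ops` of openers, `counts` of per-level tallies, top at the head here), breaking
-- on a stray top-level closer, then unwinds the unmatched openers.
def applyOp (op : Char) (n : Int) : Int :=
  if op = '<' then 2 * n
  else if op = '{' then n + 1
  else if op = '[' then 0
  else max (n - 1) 0

-- counts[-1] += 1
def bumpTop : List Int → List Int
  | [] => []
  | l :: t => (l + 1) :: t

-- v = _apply(ops.pop(), counts.pop()); counts[-1] += v
def mergeTop (op : Char) : List Int → List Int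
  | l :: p :: t => (p + applyOp op l) :: t
  | t => t

-- the for-loop over the content, with `break` modelled by returning the state
def scanB : List Char → List Char → List Int → List Char × List Int
  | [], ops, counts => (ops, counts)
  | c :: rest, ops, counts =>
    if c = 'x' then scanB rest ops (bumpTop counts)
    else if c = '<' ∨ c = '{' ∨ c = '[' ∨ c = '(' then scanB rest (c :: ops) (0 :: counts)
    else if c = '>' ∨ c = '}' ∨ c = ']' ∨ c = ')' then
      match ops with
      | [] => ([], counts)
      | op :: ops' => scanB rest ops' (mergeTop op counts)
    else scanB rest ops counts

-- the trailing while-loop: close the still-open levels; counts[0] is the answer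
def unwindB : List Char → List Int → Int
  | [], counts => counts.headD 0
  | op :: ops, counts => unwindB ops (mergeTop op counts)

def evaluate_alt (s : String) : Int :=
  let content := PySem.List.slice s.toList (some 1) (some (-1))
  let st := scanB content [] [0]
  unwindB st.1 st.2

-- ===== PRECONDITION & SPEC =====
def Spec_evaluate (s : String) (out : Int) : Prop := out = evaluate_alt s
instance (s : String) (out : Int) : Decidable (Spec_evaluate s out) := by unfold Spec_evaluate; infer_instance

-- ===== CLAIM (what is proved, stated in full; the proofs are below) =====
def Claim_equal_evaluate : Prop := ∀ (s : String), Dom_evaluate s → Spec_evaluate s (evaluate s)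

-- ===== LEMMAS AND PROOFS =====

-- Proof intermediary: the integer-length shadow of A's `process` (same recursion shape as processA).
def procL : Nat → List Char → Int × List Char
  | 0, t => (0, t)
  | _ + 1, [] => (0, [])
  | f + 1, c :: rest =>
    if c = 'x' then
      let p := procL f rest
      (1 + p.1, p.2)
    else if c = '<' then
      let i := procL f rest
      let p := procL f i.2
      (2 * i.1 + p.1, p.2)
    else if c = '{' then
      let i := procL f rest
      let p := procL f i.2
      (i.1 + 1 + p.1, p.2)
    else if c = '[' then
      let i := procL f rest
      let p := procL f i.2
      (p.1, p.2)
    else if c = '(' then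
      let i := procL f rest
      let p := procL f i.2
      (max (i.1 - 1) 0 + p.1, p.2)
    else if c = '>' ∨ c = '}' ∨ c = ']' ∨ c = ')' then (0, rest)
    else
      let p := procL f rest
      (p.1, p.2)

lemma rep_add (a b : Int) (ha : 0 ≤ a) (hb : 0 ≤ b) :
    List.replicate (a + b).toNat 'x' = List.replicate a.toNat 'x' ++ List.replicate b.toNat 'x' := by
  rw [← List.replicate_add]; congr 1; omega

-- A's result string is exactly (procL).1 many 'x', the remaining tokens coincide, total is ≥ 0.
lemma processA_eq_procL : ∀ (f : Nat) (t : List Char),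
    (processA f t).1 = List.replicate (procL f t).1.toNat 'x' ∧
    (processA f t).2 = (procL f t).2 ∧ 0 ≤ (procL f t).1 := by
  intro f
  induction f with
  | zero => intro t; simp [processA, procL]
  | succ f ih =>
    intro t
    match t with
    | [] => simp [processA, procL]
    | c :: rest =>
      obtain ⟨h1, h2, h3⟩ := ih rest
      obtain ⟨g1, g2, g3⟩ := ih (procL f rest).2
      simp only [processA, procL]
      split_ifs with hx hlt hbr hsq hp0 hpar hcl
      · dsimp only
        refine ⟨?_, h2, by omega⟩
        rw [h1, rep_add 1 _ (by omega) h3]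
        rfl
      · dsimp only
        rw [h2]
        refine ⟨?_, g2, by omega⟩
        have e : 2 * (procL f rest).1 + (procL f (procL f rest).2).1
            = (procL f rest).1 + ((procL f rest).1 + (procL f (procL f rest).2).1) := by ring
        rw [h1, g1, e, rep_add _ _ h3 (by omega), rep_add _ _ h3 g3, List.append_assoc]
      · dsimp only
        rw [h2]
        refine ⟨?_, g2, by omega⟩
        have e : (procL f rest).1 + 1 + (procL f (procL f rest).2).1
            = (procL f rest).1 + (1 + (procL f (procL f rest).2).1) := by ring
        rw [h1, g1, e, rep_add _ _ h3 (by omega), rep_add 1 _ (by omega) g3, List.append_assoc]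
        rfl
      · dsimp only
        rw [h2]
        exact ⟨g1, g2, g3⟩
      · dsimp only
        rw [h2]
        refine ⟨?_, g2, by omega⟩
        rw [h1] at hpar ⊢
        have ha : (procL f rest).1.toNat ≠ 0 := by
          intro hz
          rw [hz] at hpar
          simp at hpar
        obtain ⟨k, hk⟩ : ∃ k, (procL f rest).1.toNat = k + 1 :=
          ⟨(procL f rest).1.toNat - 1, (Nat.succ_pred_eq_of_ne_zero ha).symm⟩
        rw [g1, hk, rep_add _ _ (le_max_right _ _) g3]
        congr 1
        have e : (max ((procL f rest).1 - 1) 0).toNat = k := by omega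
        rw [e]
        simp [List.replicate_succ]
      · dsimp only
        rw [h2]
        refine ⟨?_, g2, by omega⟩
        rw [h1] at hpar ⊢
        rw [g1, rep_add _ _ (le_max_right _ _) g3]
        congr 1
        have ha : (procL f rest).1.toNat = 0 := by
          by_contra hz
          exact hpar (by simp [List.head?_replicate, hz])
        have e : (max ((procL f rest).1 - 1) 0).toNat = 0 := by omega
        rw [e, ha]
      · exact ⟨rfl, rfl, le_refl (0 : Int)⟩
      · dsimp only
        exact ⟨h1, h2, h3⟩

-- procL only consumes tokens
lemma procL_rest_len : ∀ (f : Nat) (t : List Char), (procL f t).2.length ≤ t.length := by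
  intro f
  induction f with
  | zero => intro t; simp [procL]
  | succ f ih =>
    intro t
    match t with
    | [] => simp [procL]
    | c :: rest =>
      have h1 := ih rest
      have h2 := ih (procL f rest).2
      simp only [procL]
      split_ifs <;> simp only [List.length_cons] <;> omega

-- fuel irrelevance above the length of the input
lemma procL_fuel : ∀ (f g : Nat) (t : List Char),
    t.length < f → t.length < g → procL f t = procL g t := by
  intro f
  induction f with
  | zero => intro g t hf; omega
  | succ f ih =>
    intro g t hf hg
    match g, t with
    | 0, t => omega
    | g + 1, [] => simp [procL]
    | g + 1, c :: rest =>
      simp only [List.length_cons] at hf hg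
      have e1 : procL f rest = procL g rest := ih g rest (by omega) (by omega)
      have hr : (procL f rest).2.length < f := by
        have := procL_rest_len f rest; omega
      have e2 : procL f (procL f rest).2 = procL g (procL f rest).2 :=
        ih g (procL f rest).2 (by omega) (by rw [e1] at hr ⊢; have := procL_rest_len g rest; omega)
      simp only [procL]
      split_ifs <;> simp [e1, e1 ▸ e2]

def runB (t : List Char) (ops : List Char) (counts : List Int) : Int :=
  unwindB (scanB t ops counts).1 (scanB t ops counts).2

-- one-step unfolding lemmas for procL and scanB, grouped by character class
lemma procL_x (f : Nat) (rest : List Char) :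
    procL (f + 1) ('x' :: rest) = (1 + (procL f rest).1, (procL f rest).2) := by
  simp [procL]

lemma procL_open (f : Nat) (c : Char) (rest : List Char)
    (h : c = '<' ∨ c = '{' ∨ c = '[' ∨ c = '(') :
    procL (f + 1) (c :: rest)
      = (applyOp c (procL f rest).1 + (procL f (procL f rest).2).1,
         (procL f (procL f rest).2).2) := by
  rcases h with h | h | h | h <;> subst h <;> simp [procL, applyOp]

lemma procL_close (f : Nat) (c : Char) (rest : List Char)
    (h : c = '>' ∨ c = '}' ∨ c = ']' ∨ c = ')') :
    procL (f + 1) (c :: rest) = (0, rest) := by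
  rcases h with h | h | h | h <;> subst h <;> simp [procL]

lemma procL_other (f : Nat) (c : Char) (rest : List Char)
    (hx : ¬ c = 'x') (hop : ¬ (c = '<' ∨ c = '{' ∨ c = '[' ∨ c = '('))
    (hcl : ¬ (c = '>' ∨ c = '}' ∨ c = ']' ∨ c = ')')) :
    procL (f + 1) (c :: rest) = procL f rest := by
  simp only [procL]
  rw [if_neg hx, if_neg (by tauto), if_neg (by tauto), if_neg (by tauto), if_neg (by tauto),
      if_neg hcl]

lemma runB_x (rest : List Char) (ops : List Char) (l : Int) (cs : List Int) :
    runB ('x' :: rest) ops (l :: cs) = runB rest ops ((l + 1) :: cs) := by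
  simp [runB, scanB, bumpTop]

lemma runB_open (rest : List Char) (c : Char)
    (h : c = '<' ∨ c = '{' ∨ c = '[' ∨ c = '(') (ops : List Char) (counts : List Int) :
    runB (c :: rest) ops counts = runB rest (c :: ops) (0 :: counts) := by
  rcases h with h | h | h | h <;> subst h <;> simp [runB, scanB]

lemma runB_close_nil (rest : List Char) (c : Char)
    (h : c = '>' ∨ c = '}' ∨ c = ']' ∨ c = ')') (l : Int) :
    runB (c :: rest) [] [l] = l := by
  rcases h with h | h | h | h <;> subst h <;> simp [runB, scanB, unwindB]

lemma runB_close_cons (rest : List Char) (c : Char)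
    (h : c = '>' ∨ c = '}' ∨ c = ']' ∨ c = ')') (op : Char) (ops : List Char)
    (l p : Int) (cs : List Int) :
    runB (c :: rest) (op :: ops) (l :: p :: cs)
      = runB rest ops ((p + applyOp op l) :: cs) := by
  rcases h with h | h | h | h <;> subst h <;> simp [runB, scanB, mergeTop]

lemma runB_other (rest : List Char) (c : Char)
    (hx : ¬ c = 'x') (hop : ¬ (c = '<' ∨ c = '{' ∨ c = '[' ∨ c = '('))
    (hcl : ¬ (c = '>' ∨ c = '}' ∨ c = ']' ∨ c = ')')) (ops : List Char) (counts : List Int) :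
    runB (c :: rest) ops counts = runB rest ops counts := by
  simp only [runB, scanB]
  rw [if_neg hx, if_neg hop, if_neg hcl]

-- The stack machine simulates A's recursive descent: at top level it adds the level's total to the
-- tally and ignores the dropped suffix; inside a level it closes the level and continues on the rest.
lemma runB_sim : ∀ (n : Nat) (t : List Char), t.length ≤ n →
    ((∀ l : Int, runB t [] [l] = l + (procL (t.length + 1) t).1) ∧
     (∀ (op : Char) (ops : List Char) (l p : Int) (cs : List Int),
       runB t (op :: ops) (l :: p :: cs) =
         runB (procL (t.length + 1) t).2 ops
           ((p + applyOp op (l + (procL (t.length + 1) t).1)) :: cs))) := by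
  intro n
  induction n with
  | zero =>
    intro t ht
    match t, ht with
    | [], _ => exact ⟨by intro l; simp [runB, scanB, unwindB, procL],
                     by intro op ops l p cs; simp [runB, scanB, procL, unwindB, mergeTop]⟩
  | succ n ih =>
    intro t ht
    match t with
    | [] => exact ⟨by intro l; simp [runB, scanB, unwindB, procL],
                   by intro op ops l p cs; simp [runB, scanB, procL, unwindB, mergeTop]⟩
    | c :: rest =>
      simp only [List.length_cons] at ht
      have hrest : rest.length ≤ n := by omega
      have ihr := ih rest hrest
      have hlen2 := procL_rest_len (rest.length + 1) rest
      have ih2 := ih (procL (rest.length + 1) rest).2 (by omega)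
      have efuel : procL ((procL (rest.length + 1) rest).2.length + 1) (procL (rest.length + 1) rest).2
          = procL (rest.length + 1) (procL (rest.length + 1) rest).2 :=
        procL_fuel _ _ _ (by omega) (by omega)
      rw [efuel] at ih2
      by_cases hx : c = 'x'
      · subst hx
        constructor
        · intro l
          rw [runB_x, ihr.1, List.length_cons, procL_x]
          dsimp only
          omega
        · intro op ops l p cs
          rw [runB_x, ihr.2, List.length_cons, procL_x]
          dsimp only
          have e : l + 1 + (procL (rest.length + 1) rest).1
              = l + (1 + (procL (rest.length + 1) rest).1) := by ring
          rw [e]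
      · by_cases hop : c = '<' ∨ c = '{' ∨ c = '[' ∨ c = '('
        · constructor
          · intro l
            rw [runB_open rest c hop, ihr.2, ih2.1, List.length_cons, procL_open _ c rest hop]
            dsimp only
            rw [zero_add]
            ring
          · intro op ops l p cs
            rw [runB_open rest c hop, ihr.2, ih2.2, List.length_cons, procL_open _ c rest hop]
            dsimp only
            rw [zero_add]
            have e : l + applyOp c (procL (rest.length + 1) rest).1
                  + (procL (rest.length + 1) (procL (rest.length + 1) rest).2).1
                = l + (applyOp c (procL (rest.length + 1) rest).1
                  + (procL (rest.length + 1) (procL (rest.length + 1) rest).2).1) := by ring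
            rw [e]
        · by_cases hcl : c = '>' ∨ c = '}' ∨ c = ']' ∨ c = ')'
          · constructor
            · intro l
              rw [runB_close_nil rest c hcl, List.length_cons, procL_close _ c rest hcl]
              dsimp only
              ring
            · intro op ops l p cs
              rw [runB_close_cons rest c hcl, List.length_cons, procL_close _ c rest hcl]
              dsimp only
              rw [add_zero]
          · constructor
            · intro l
              rw [runB_other rest c hx hop hcl, ihr.1, List.length_cons,
                  procL_other _ c rest hx hop hcl]
            · intro op ops l p cs
              rw [runB_other rest c hx hop hcl, ihr.2, List.length_cons,
                  procL_other _ c rest hx hop hcl]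

-- ===== VERDICT (by name: the statement is the Claim_ definition above) =====
theorem evaluate_spec : Claim_equal_evaluate := by
  intro s _
  unfold Spec_evaluate evaluate evaluate_alt
  set content := PySem.List.slice s.toList (some 1) (some (-1)) with hc
  obtain ⟨h1, _, h3⟩ := processA_eq_procL (2 * content.length + 2) content
  have hrun := (runB_sim content.length content le_rfl).1 0
  have hfuel : procL (content.length + 1) content = procL (2 * content.length + 2) content :=
    procL_fuel _ _ _ (by omega) (by omega)
  simp only [runB] at hrun
  dsimp only
  rw [hrun, hfuel, h1, List.length_replicate]
  rw [Int.toNat_of_nonneg h3]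
  ring
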